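-- pv_equiv track=rewrite | github.com/BIDMAL/codewarsish | HackerRank/Algorithms/Implrementation/ACM ICPC Team.py | acmTeam
-- ===== SOURCE A (Python) =====
-- def acmTeam(topic):
--     nts = len(topic[0])
--     tsmax = 0
--     ntms = 0
--     n = len(topic)
--     for i in range(n-1):
--         for j in range(i+1,n):
--             combined = str(int(topic[i]) + int(topic[j]))
--             teamts = nts - combined.count('0') - (nts-len(combined))
--             if teamts > tsmax:
--                 ntms = 1
--                 tsmax = teamts
--             elif teamts == tsmax:
--                 ntms += 1
--     return([tsmax, ntms])
-- ===== SOURCE B (Python) =====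
-- def acmTeam(topic):
--     if len(topic) < 2:
--         return [0, 0]
--     nums = [int(t) for t in topic]
--     hist = {}
--     for i in range(1, len(nums)):
--         for b in nums[:i]:
--             s = str(nums[i] + b)
--             score = len(s) - s.count('0')
--             hist[score] = hist.get(score, 0) + 1
--     best = max(hist)
--     return [best, hist[best]]
-- ===== Notes on version B (the rewrite author's own statement) =====
-- stated objective: alternative
-- what changed: B replaces A's nested forward index loops with a running max/count state machine by a frequency dictionary (Counter pattern): it enumerates each element against its EARLIER partners via list slices, tallies every pair score into a histogram keyed by score, and reads the answer off as the maximum key and its stored multiplicity.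
import Mathlib
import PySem

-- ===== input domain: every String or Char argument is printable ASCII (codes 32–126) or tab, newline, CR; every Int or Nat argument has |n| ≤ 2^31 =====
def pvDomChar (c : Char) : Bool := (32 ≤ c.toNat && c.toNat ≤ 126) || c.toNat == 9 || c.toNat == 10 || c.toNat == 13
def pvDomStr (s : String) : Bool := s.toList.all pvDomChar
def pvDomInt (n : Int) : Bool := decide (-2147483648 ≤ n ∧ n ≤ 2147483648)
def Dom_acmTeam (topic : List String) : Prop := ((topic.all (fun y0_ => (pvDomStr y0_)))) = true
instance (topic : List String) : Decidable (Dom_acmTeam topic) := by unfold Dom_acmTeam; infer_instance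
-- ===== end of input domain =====

-- B tallies every pair score into a histogram dictionary (pairing each element with its
-- EARLIER partners via slices) and reads off the maximum key and its multiplicity, instead
-- of A's forward index loops with a running max/count state machine (objective: alternative).


-- ===== PORT A =====
def acmTeam (topic : List String) : List Int :=
  let nts : Int := PySem.Str.len ((PySem.List.pyGet? topic 0).getD "")
  let n : Int := PySem.List.len topic
  let st := (PySem.List.pyRange 0 (n - 1) 1).foldl (fun st i =>
      (PySem.List.pyRange (i + 1) n 1).foldl (fun st j =>
        let combined := PySem.Int.toStr
          ((PySem.Int.ofStr? (PySem.List.pyGetD topic i "")).getD 0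
            + (PySem.Int.ofStr? (PySem.List.pyGetD topic j "")).getD 0)
        let teamts : Int := nts - (PySem.Str.count combined "0" : Int) - (nts - PySem.Str.len combined)
        if st.1 < teamts then (teamts, (1 : Int))
        else if teamts = st.1 then (st.1, st.2 + 1)
        else st) st)
    ((0 : Int), (0 : Int))
  [st.1, st.2]

-- ===== PORT B =====
def acmTeam_alt (topic : List String) : List Int :=
  if topic.length < 2 then [0, 0]
  else
    let nums := topic.map (fun t => (PySem.Int.ofStr? t).getD 0)
    let hist := (PySem.List.pyRange 1 (PySem.List.len nums) 1).foldl (fun h i =>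
      (PySem.List.slice nums none (some i)).foldl (fun h b =>
        let s := PySem.Int.toStr (PySem.List.pyGetD nums i 0 + b)
        let score : Int := PySem.Str.len s - (PySem.Str.count s "0" : Int)
        h.modify score 0 (· + 1)) h) (PySem.Dict.empty (κ := Int) (ν := Int))
    let best := (PySem.List.max? hist.keys (fun y => y)).getD 0
    [best, hist.getD best 0]

-- ===== PRECONDITION & SPEC =====
-- Pre_ excludes exactly the inputs on which Python A raises: the empty list (IndexError on
-- topic[0]) and, when there are at least two topics, any element int() cannot parse (ValueError).
def Pre_acmTeam (topic : List String) : Prop :=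
  topic ≠ [] ∧ (2 ≤ topic.length → ∀ s ∈ topic, (PySem.Int.ofStr? s).isSome = true)
instance (topic : List String) : Decidable (Pre_acmTeam topic) := by unfold Pre_acmTeam; infer_instance
def pvWitness_acmTeam : List String := ["10", "11", "100"]

def Spec_acmTeam (topic : List String) (out : List Int) : Prop := out = acmTeam_alt topic
instance (topic : List String) (out : List Int) : Decidable (Spec_acmTeam topic out) := by unfold Spec_acmTeam; infer_instance

-- ===== CLAIM (what is proved, stated in full; the proofs are below) =====
def Claim_equal_acmTeam : Prop := ∀ (topic : List String), Dom_acmTeam topic → Pre_acmTeam topic → Spec_acmTeam topic (acmTeam topic)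

-- ===== LEMMAS AND PROOFS =====

-- proof-side name for B's readout of its histogram
def pvOut (h : PySem.Dict Int Int) : List Int :=
  [(PySem.List.max? h.keys (fun y => y)).getD 0,
   h.getD ((PySem.List.max? h.keys (fun y => y)).getD 0) 0]

-- the per-pair score both programs compute: len(str(x)) - str(x).count('0')
def pairScore (x : Int) : Int :=
  PySem.Str.len (PySem.Int.toStr x) - (PySem.Str.count (PySem.Int.toStr x) "0" : Int)

-- A's flat pair-score list: every element paired with each LATER one
def TAl (l : List Int) : List Int :=
  (List.range l.length).flatMap (fun i =>
    (l.drop (i + 1)).map (fun b => pairScore (l.getD i 0 + b)))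

-- B's flat pair-score list: every element paired with each EARLIER one
def TBl (l : List Int) : List Int :=
  (List.range l.length).flatMap (fun i =>
    (l.take i).map (fun b => pairScore (l.getD i 0 + b)))

-- s.count('0') with a single-character needle is the plain character count
theorem go_single (c : Char) : ∀ (fuel : Nat) (l : List Char) (acc : Nat), l.length ≤ fuel →
    PySem.Chars.count.go [c] fuel l acc = acc + l.count c := by
  intro fuel
  induction fuel with
  | zero => intro l acc h; cases l <;> simp_all [PySem.Chars.count.go]
  | succ fuel ih =>
    intro l acc h
    cases l with
    | nil => simp [PySem.Chars.count.go]
    | cons hd t =>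
      rw [PySem.Chars.count.go]
      by_cases hc : hd = c
      · subst hc
        have hp : List.isPrefixOf [hd] (hd :: t) = true := by simp [List.isPrefixOf]
        simp only [hp, if_pos]
        rw [ih _ _ (by simpa using Nat.le_of_succ_le_succ h)]
        simp
        omega
      · have hp : List.isPrefixOf [c] (hd :: t) = false := by
          simp [List.isPrefixOf]; exact fun h => absurd h.symm hc
        rw [if_neg (by simp [hp])]
        rw [ih _ _ (Nat.le_of_succ_le_succ h)]
        simp [hc]

theorem chars_count_single (c : Char) (cs : List Char) :
    PySem.Chars.count cs [c] = cs.count c := by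
  rw [PySem.Chars.count]
  simpa using go_single c cs.length cs 0 le_rfl

theorem pairScore_nonneg (x : Int) : 0 ≤ pairScore x := by
  have h1 : PySem.Str.count (PySem.Int.toStr x) "0" = (PySem.Int.toChars x).count '0' := by
    rw [PySem.Str.count_eq, PySem.Int.toList_toStr]
    have : "0".toList = ['0'] := by decide
    rw [this, chars_count_single]
  have h2 : PySem.Str.len (PySem.Int.toStr x) = ((PySem.Int.toChars x).length : Int) := by
    simp [PySem.Str.len_eq, PySem.Int.toList_toStr]
  have h3 := List.count_le_length (l := PySem.Int.toChars x) (a := '0')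
  rw [pairScore, h1, h2]
  omega

theorem mem_TBl_nonneg (l : List Int) (y : Int) (hy : y ∈ TBl l) : 0 ≤ y := by
  rw [TBl] at hy
  obtain ⟨i, _, hy⟩ := List.mem_flatMap.mp hy
  obtain ⟨b, _, rfl⟩ := List.mem_map.mp hy
  exact pairScore_nonneg _

theorem TBl_ne_nil (l : List Int) (h2 : 2 ≤ l.length) : TBl l ≠ [] := by
  intro hc
  obtain ⟨a, l', hal⟩ : ∃ a l', l = a :: l' :=
    List.exists_cons_of_ne_nil (by intro h; rw [h] at h2; simp at h2)
  have hmem : pairScore (l.getD 1 0 + l.getD 0 0) ∈ TBl l := by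
    rw [TBl]
    refine List.mem_flatMap.mpr ⟨1, List.mem_range.mpr (by omega), ?_⟩
    refine List.mem_map.mpr ⟨l.getD 0 0, ?_, rfl⟩
    rw [hal]
    simp
  rw [hc] at hmem
  simp at hmem

-- A's running max/count state machine over a list of scores computes max and count-of-max
theorem foldl_step_eq (L : List Int) :
    L.foldl (fun st t =>
        if st.1 < t then (t, (1 : Int))
        else if t = st.1 then (st.1, st.2 + 1)
        else st) ((0 : Int), (0 : Int))
      = (L.foldl max 0, (L.count (L.foldl max 0) : Int)) := by
  induction L using List.reverseRecOn with
  | nil => simp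
  | append_singleton L t ih =>
    rw [List.foldl_append, List.foldl_append, ih]
    set M := L.foldl max 0 with hM
    have hle : ∀ y ∈ L, y ≤ M := (PySem.List.le_foldl_max L 0).2
    simp only [List.foldl_cons, List.foldl_nil]
    by_cases h1 : M < t
    · rw [if_pos h1]
      have hmax : max M t = t := max_eq_right h1.le
      have hnot : t ∉ L := fun hm => absurd (hle t hm) (not_le.mpr h1)
      rw [hmax]
      simp [List.count_append, List.count_eq_zero.mpr hnot]
    · rw [if_neg h1]
      have hmax : max M t = M := max_eq_left (not_lt.mp h1)
      by_cases h2 : t = M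
      · rw [if_pos h2]
        subst h2
        simp [List.count_append]
      · rw [if_neg h2]
        simp [hmax, List.count_append, h2]

-- running max from 0 depends only on which elements occur
theorem foldl_max_eq_of_mem (l₁ l₂ : List Int) (h : ∀ y, y ∈ l₁ ↔ y ∈ l₂) :
    l₁.foldl max 0 = l₂.foldl max 0 := by
  have h1 := PySem.List.le_foldl_max l₁ 0
  have h2 := PySem.List.le_foldl_max l₂ 0
  apply le_antisymm
  · rcases PySem.List.foldl_max_mem l₁ 0 with he | hm
    · rw [he]; exact h2.1
    · exact h2.2 _ ((h _).mp hm)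
  · rcases PySem.List.foldl_max_mem l₂ 0 with he | hm
    · rw [he]; exact h1.1
    · exact h1.2 _ ((h _).mpr hm)

theorem map_range_getD (l : List Int) :
    (List.range l.length).map (fun i => l.getD i 0) = l := by
  apply List.ext_getElem
  · simp
  · intro i h1 h2
    simp [List.getD_eq_getElem?_getD, List.getElem?_eq_getElem h2]

-- interleaving: appending one extra element per block is, up to permutation, appending them all at the end
theorem flatMap_append_singleton_perm {α β : Type} (r : List α) (g : α → List β) (h : α → β) :
    (r.flatMap (fun i => g i ++ [h i])).Perm (r.flatMap g ++ r.map h) := by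
  induction r with
  | nil => simp
  | cons a r ih =>
    simp only [List.flatMap_cons, List.map_cons]
    have h2 := ih.append_left (g a ++ [h a])
    refine h2.trans ?_
    have h3 : (g a ++ [h a]) ++ (r.flatMap g ++ r.map h)
        = g a ++ ([h a] ++ (r.flatMap g ++ r.map h)) := by simp
    rw [h3]
    have h4 : ([h a] ++ (r.flatMap g ++ r.map h)).Perm (r.flatMap g ++ (h a :: r.map h)) := by
      simpa using (List.perm_middle (a := h a) (l₁ := r.flatMap g) (l₂ := r.map h)).symm
    have h5 := h4.append_left (g a)
    simpa using h5

-- the later-partners and earlier-partners pair-score lists are permutations of each other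
theorem TAl_perm_TBl (l : List Int) : (TAl l).Perm (TBl l) := by
  induction l using List.reverseRecOn with
  | nil => simp [TAl, TBl]
  | append_singleton l x ih =>
    have hlen : (l ++ [x]).length = l.length + 1 := by simp
    have hB : TBl (l ++ [x]) = TBl l ++ l.map (fun b => pairScore (x + b)) := by
      rw [TBl, hlen, List.range_succ, List.flatMap_append]
      congr 1
      · rw [TBl]
        apply List.flatMap_congr
        intro i hi
        have hi' : i < l.length := List.mem_range.mp hi
        rw [List.take_append_of_le_length hi'.le,
            List.getD_append _ _ _ _ hi']
      · simp
    have hA : TAl (l ++ [x])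
        = (List.range l.length).flatMap (fun i =>
            (l.drop (i + 1)).map (fun b => pairScore (l.getD i 0 + b))
              ++ [pairScore (l.getD i 0 + x)]) := by
      rw [TAl, hlen, List.range_succ, List.flatMap_append]
      have hlast : ([l.length] : List Nat).flatMap (fun i =>
          ((l ++ [x]).drop (i + 1)).map (fun b => pairScore ((l ++ [x]).getD i 0 + b))) = [] := by
        simp [List.drop_eq_nil_of_le]
      rw [hlast, List.append_nil]
      apply List.flatMap_congr
      intro i hi
      have hi' : i < l.length := List.mem_range.mp hi
      rw [List.drop_append_of_le_length (by omega), List.getD_append _ _ _ _ hi',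
          List.map_append]
      simp
    rw [hA, hB]
    refine (flatMap_append_singleton_perm _ _ _).trans ?_
    have hmap : (List.range l.length).map (fun i => pairScore (l.getD i 0 + x))
        = l.map (fun b => pairScore (x + b)) := by
      have := map_range_getD l
      calc (List.range l.length).map (fun i => pairScore (l.getD i 0 + x))
          = ((List.range l.length).map (fun i => l.getD i 0)).map
              (fun b => pairScore (x + b)) := by
            rw [List.map_map]; exact List.map_congr_left (fun i _ => by
              simp [Function.comp, Int.add_comm])
        _ = l.map (fun b => pairScore (x + b)) := by rw [this]
    rw [hmap]
    exact List.Perm.append ih (List.Perm.refl _)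

-- A is the running-state fold of its flat pair-score list
set_option maxHeartbeats 1000000 in
theorem A_eq_fold (topic : List String) (hlen : 2 ≤ topic.length) :
    acmTeam topic
      = [((TAl (topic.map (fun t => (PySem.Int.ofStr? t).getD 0))).foldl (fun st t =>
            if st.1 < t then (t, (1 : Int))
            else if t = st.1 then (st.1, st.2 + 1)
            else st) (0, 0)).1,
         ((TAl (topic.map (fun t => (PySem.Int.ofStr? t).getD 0))).foldl (fun st t =>
            if st.1 < t then (t, (1 : Int))
            else if t = st.1 then (st.1, st.2 + 1)
            else st) (0, 0)).2] := by
  set parse : String → Int := fun t => (PySem.Int.ofStr? t).getD 0 with hparse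
  set nums : List Int := topic.map parse with hnums
  set n : Int := PySem.List.len topic with hn
  set nts : Int := PySem.Str.len ((PySem.List.pyGet? topic 0).getD "") with hnts
  set step : Int × Int → Int → Int × Int := fun st t =>
    if st.1 < t then (t, (1 : Int))
    else if t = st.1 then (st.1, st.2 + 1)
    else st with hstep
  have hnn : (nums.length : Int) = n := by simp [hn, hnums, PySem.List.len]
  have hlen2 : 2 ≤ nums.length := by simpa [hnums] using hlen
  have hget : ∀ j : Int, parse (PySem.List.pyGetD topic j "") = PySem.List.pyGetD nums j 0 := by
    intro j
    have h0 : parse "" = 0 := rfl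
    rw [hnums, ← h0, PySem.List.pyGetD_map]
  have eTA : TAl nums = (PySem.List.pyRange 0 (n - 1) 1).flatMap (fun i =>
      (PySem.List.pyRange (i + 1) n 1).map (fun j =>
        nts - (PySem.Str.count (PySem.Int.toStr
                (parse (PySem.List.pyGetD topic i "") + parse (PySem.List.pyGetD topic j ""))) "0" : Int)
          - (nts - PySem.Str.len (PySem.Int.toStr
                (parse (PySem.List.pyGetD topic i "") + parse (PySem.List.pyGetD topic j "")))))) := by
    have hcast : n - 1 = ((nums.length - 1 : Nat) : Int) := by
      rw [← hnn]; omega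
    rw [hcast, PySem.List.pyRange_zero_natCast, List.flatMap_map, TAl]
    have hsplit : List.range nums.length = List.range (nums.length - 1) ++ [nums.length - 1] := by
      obtain ⟨m, hm⟩ : ∃ m, nums.length = m + 1 := ⟨nums.length - 1, by omega⟩
      rw [hm, List.range_succ]
      simp
    rw [hsplit, List.flatMap_append]
    have hlast : ([nums.length - 1] : List Nat).flatMap (fun i =>
        (nums.drop (i + 1)).map (fun b => pairScore (nums.getD i 0 + b))) = [] := by
      simp [List.drop_eq_nil_of_le, Nat.sub_add_cancel (by omega : 1 ≤ nums.length)]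
    rw [hlast, List.append_nil]
    apply List.flatMap_congr
    intro k hk
    have hk' : k < nums.length - 1 := List.mem_range.mp hk
    calc (nums.drop (k + 1)).map (fun b => pairScore (nums.getD k 0 + b))
        = ((PySem.List.pyRange ((k : Int) + 1) n 1).map (fun j => PySem.List.pyGetD nums j 0)).map
            (fun b => pairScore (nums.getD k 0 + b)) := by
          rw [← hnn, PySem.List.map_pyGetD_pyRange' nums 0 (by omega : (0:Int) ≤ (k : Int) + 1)]
          rw [show ((k : Int) + 1).toNat = k + 1 from by omega]
      _ = (PySem.List.pyRange ((k : Int) + 1) n 1).map (fun j =>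
            nts - (PySem.Str.count (PySem.Int.toStr
                    (parse (PySem.List.pyGetD topic (k : Int) "") + parse (PySem.List.pyGetD topic j ""))) "0" : Int)
              - (nts - PySem.Str.len (PySem.Int.toStr
                    (parse (PySem.List.pyGetD topic (k : Int) "") + parse (PySem.List.pyGetD topic j ""))))) := by
          rw [List.map_map]
          apply List.map_congr_left
          intro j _
          simp only [Function.comp]
          rw [hget, hget, PySem.List.pyGetD_natCast, pairScore]
          omega
  have hfold : (PySem.List.pyRange 0 (n - 1) 1).foldl (fun st i =>
      (PySem.List.pyRange (i + 1) n 1).foldl (fun st j =>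
        if st.1 < nts - (PySem.Str.count (PySem.Int.toStr
                (parse (PySem.List.pyGetD topic i "") + parse (PySem.List.pyGetD topic j ""))) "0" : Int)
              - (nts - PySem.Str.len (PySem.Int.toStr
                (parse (PySem.List.pyGetD topic i "") + parse (PySem.List.pyGetD topic j ""))))
        then (nts - (PySem.Str.count (PySem.Int.toStr
                (parse (PySem.List.pyGetD topic i "") + parse (PySem.List.pyGetD topic j ""))) "0" : Int)
              - (nts - PySem.Str.len (PySem.Int.toStr
                (parse (PySem.List.pyGetD topic i "") + parse (PySem.List.pyGetD topic j "")))), (1 : Int))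
        else if nts - (PySem.Str.count (PySem.Int.toStr
                (parse (PySem.List.pyGetD topic i "") + parse (PySem.List.pyGetD topic j ""))) "0" : Int)
              - (nts - PySem.Str.len (PySem.Int.toStr
                (parse (PySem.List.pyGetD topic i "") + parse (PySem.List.pyGetD topic j ""))))
            = st.1
        then (st.1, st.2 + 1)
        else st) st) ((0 : Int), (0 : Int))
      = (TAl nums).foldl step (0, 0) := by
    rw [eTA, List.foldl_flatMap]
    apply PySem.List.foldl_congr_mem
    intro st i _
    rw [List.foldl_map]
  rw [acmTeam]
  simp only [← hn, ← hnts]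
  rw [hfold]

-- B builds exactly the counter (histogram) of its flat pair-score list and reads it out
set_option maxHeartbeats 1000000 in
theorem B_eq_counter (topic : List String) (hlen : 2 ≤ topic.length) :
    acmTeam_alt topic
      = pvOut (PySem.Dict.counter (TBl (topic.map (fun t => (PySem.Int.ofStr? t).getD 0)))) := by
  set nums : List Int := topic.map (fun t => (PySem.Int.ofStr? t).getD 0) with hnums
  set n : Int := PySem.List.len nums with hn
  have hnn : (nums.length : Int) = n := by simp [hn, PySem.List.len]
  have hlen2 : 2 ≤ nums.length := by simpa [hnums] using hlen
  have hTB : (PySem.List.pyRange 1 n 1).flatMap (fun i =>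
        (nums.take i.toNat).map (fun b => pairScore (PySem.List.pyGetD nums i 0 + b)))
      = TBl nums := by
    have h0n : (0 : Int) < n := by omega
    have e0 : PySem.List.pyRange 0 n 1 = 0 :: PySem.List.pyRange 1 n 1 := by
      have := PySem.List.pyRange_one_cons h0n
      simpa using this
    have e1 : TBl nums = (PySem.List.pyRange 0 n 1).flatMap (fun i =>
        (nums.take i.toNat).map (fun b => pairScore (PySem.List.pyGetD nums i 0 + b))) := by
      have hcast : n = ((nums.length : Nat) : Int) := hnn.symm
      rw [hcast, PySem.List.pyRange_zero_natCast, List.flatMap_map, TBl]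
      apply List.flatMap_congr
      intro k _
      rw [PySem.List.pyGetD_natCast]
      simp
    rw [e1, e0, List.flatMap_cons]
    simp
  have hhist : (PySem.List.pyRange 1 (PySem.List.len nums) 1).foldl (fun h i =>
        (PySem.List.slice nums none (some i)).foldl (fun h b =>
          h.modify (PySem.Str.len (PySem.Int.toStr (PySem.List.pyGetD nums i 0 + b))
              - (PySem.Str.count (PySem.Int.toStr (PySem.List.pyGetD nums i 0 + b)) "0" : Int)) 0 (· + 1)) h)
        (PySem.Dict.empty (κ := Int) (ν := Int))
      = PySem.Dict.counter (TBl nums) := by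
    rw [PySem.Dict.counter_eq_foldl, ← hTB, List.foldl_flatMap, ← hn]
    apply PySem.List.foldl_congr_mem
    intro d i hi
    have hi1 : 1 ≤ i := (PySem.List.mem_pyRange_one.mp hi).1
    rw [PySem.List.slice_to nums (by omega : (0:Int) ≤ i), List.foldl_map]
    apply PySem.List.foldl_congr_mem
    intro d' b _
    rw [pairScore]
  rw [acmTeam_alt, if_neg (not_lt.mpr hlen)]
  simp only [← hnums, hhist, pvOut]

-- the readout of the histogram of L2 is A's (max, count) over any permutation L1, for nonempty nonneg scores
theorem counter_out_eq (L1 L2 : List Int) (hperm : L1.Perm L2) (hne : L2 ≠ [])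
    (hpos : ∀ y ∈ L2, 0 ≤ y) :
    [(L1.foldl (fun st t =>
        if st.1 < t then (t, (1 : Int))
        else if t = st.1 then (st.1, st.2 + 1)
        else st) (0, 0)).1,
     (L1.foldl (fun st t =>
        if st.1 < t then (t, (1 : Int))
        else if t = st.1 then (st.1, st.2 + 1)
        else st) (0, 0)).2]
      = pvOut (PySem.Dict.counter L2) := by
  rw [foldl_step_eq]
  have hkeys : (PySem.Dict.counter L2).keys = PySem.Set.ofList L2 :=
    PySem.Dict.keys_counter _
  set K : Int := L2.foldl max 0 with hK
  have hbest : (PySem.List.max? (PySem.Dict.counter L2).keys (fun y => y)).getD 0 = K := by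
    rw [hkeys]
    cases hmx : PySem.List.max? (PySem.Set.ofList L2) (fun y => y) with
    | none =>
      exfalso
      have := (PySem.List.max?_eq_none_iff _ _).mp hmx
      obtain ⟨y, hy⟩ := List.exists_mem_of_ne_nil _ hne
      have : y ∈ PySem.Set.ofList L2 := (PySem.Set.mem_ofList _ _).mpr hy
      simp_all
    | some M =>
      have hMmem : M ∈ L2 := (PySem.Set.mem_ofList _ _).mp (PySem.List.max?_mem hmx)
      have hMmax : ∀ y ∈ L2, y ≤ M := fun y hy =>
        PySem.List.max?_isMax hmx y ((PySem.Set.mem_ofList _ _).mpr hy)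
      have h2 := PySem.List.le_foldl_max L2 0
      have hMK : M ≤ K := h2.2 _ hMmem
      have hKM : K ≤ M := by
        rcases PySem.List.foldl_max_mem L2 0 with he | hm
        · rw [hK, he]
          exact hpos M hMmem
        · exact hMmax _ hm
      simp [le_antisymm hMK hKM]
  have hKA : L1.foldl max 0 = K := foldl_max_eq_of_mem _ _ (fun y => hperm.mem_iff)
  rw [pvOut, hbest, PySem.Dict.getD_counter, hKA, hperm.count_eq]

theorem acmTeam_spec' (topic : List String) (hpre : Pre_acmTeam topic) :
    acmTeam topic = acmTeam_alt topic := by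
  obtain ⟨hne, _⟩ := hpre
  by_cases hlen : topic.length < 2
  · match topic, hne with
    | [s], _ => simp [acmTeam, acmTeam_alt]
    | t₁ :: t₂ :: r, _ => simp at hlen
  · rw [not_lt] at hlen
    rw [A_eq_fold topic hlen, B_eq_counter topic hlen]
    exact counter_out_eq _ _ (TAl_perm_TBl _)
      (TBl_ne_nil _ (by simpa using hlen))
      (fun y hy => mem_TBl_nonneg _ y hy)

-- ===== VERDICT (by name: the statement is the Claim_ definition above) =====
theorem acmTeam_spec : Claim_equal_acmTeam := by
  intro topic _ hpre
  exact acmTeam_spec' topic hpre
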